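-- pv_equiv track=rewrite | github.com/tanjiaxian/algorithm | ml/DecisionTree1.py | majorClass
-- ===== SOURCE A (Python) =====
-- def majorClass(labelArr):
--     """获取标签集中最多数的类别"""
--     classDict = {}
--
--     for j in labelArr:
--         if j not in classDict:
--             classDict[j] = 1
--         else:
--             classDict[j] += 1
--
--     classDict = sorted(classDict.items(), key=lambda x: x[1], reverse=True)
--     return classDict[0][0]
-- ===== SOURCE B (Python) =====
-- def majorClass(labelArr):
--     """获取标签集中最多数的类别"""
--     counts = {}
--     for j in labelArr:
--         if j in counts:
--             counts[j] += 1
--         else: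
--             counts[j] = 1
--     items = list(counts.items())
--     best = items[0]
--     for item in items[1:]:
--         if item[1] > best[1]:
--             best = item
--     return best[0]
-- ===== Notes on version B (the rewrite author's own statement) =====
-- stated objective: simpler
-- what changed: Replaces the stable reverse sort of the frequency-dict items by a single linear selection scan (strict '>' keeps the earliest-inserted label among ties, matching the stable sort's head).
import Mathlib
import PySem

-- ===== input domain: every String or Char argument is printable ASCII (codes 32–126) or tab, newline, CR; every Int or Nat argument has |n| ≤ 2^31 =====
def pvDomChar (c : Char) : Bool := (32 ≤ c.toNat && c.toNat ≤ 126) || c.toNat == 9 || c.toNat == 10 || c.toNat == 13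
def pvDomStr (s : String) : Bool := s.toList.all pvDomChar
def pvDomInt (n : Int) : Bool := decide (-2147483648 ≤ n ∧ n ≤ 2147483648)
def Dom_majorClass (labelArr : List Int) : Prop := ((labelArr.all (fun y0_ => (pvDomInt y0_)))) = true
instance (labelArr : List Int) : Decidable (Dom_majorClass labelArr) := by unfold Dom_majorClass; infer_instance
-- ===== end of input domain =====

-- B replaces the stable reverse sort of the frequency-dict items by a single linear
-- selection scan with strict '>' (objective: simpler). Equivalence of the RETURN value.

-- ===== PORT A =====
def majorClass (labelArr : List Int) : Int :=
  let classDict := labelArr.foldl (fun d j =>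
    if !(d.contains j) then d.insert j 1 else d.insert j (d.getD j 0 + 1))
    (PySem.Dict.empty : PySem.Dict Int Int)
  let sortedItems := PySem.List.sorted classDict.items (fun x => x.2) true
  match PySem.List.pyGet? sortedItems 0 with
  | some p => p.1
  | none => 0  -- classDict[0][0] raises IndexError on empty labelArr; excluded by Pre_

-- ===== PORT B =====
def majorClass_alt (labelArr : List Int) : Int :=
  let counts := labelArr.foldl (fun d j =>
    if d.contains j then d.insert j (d.getD j 0 + 1) else d.insert j 1)
    (PySem.Dict.empty : PySem.Dict Int Int)
  match counts.items with
  | [] => 0  -- items[0] raises IndexError on empty labelArr; excluded by Pre_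
  | h :: t => (t.foldl (fun best item => if item.2 > best.2 then item else best) h).1

-- ===== PRECONDITION & SPEC =====
-- Pre_ excludes exactly the empty list, on which A raises IndexError.
def Pre_majorClass (labelArr : List Int) : Prop := labelArr ≠ []
instance (labelArr : List Int) : Decidable (Pre_majorClass labelArr) := by
  unfold Pre_majorClass; infer_instance

def pvWitness_majorClass : List Int := [1, 2, 2, 3]

def Spec_majorClass (labelArr : List Int) (out : Int) : Prop := out = majorClass_alt labelArr
instance (labelArr : List Int) (out : Int) : Decidable (Spec_majorClass labelArr out) := by
  unfold Spec_majorClass; infer_instance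

-- ===== CLAIM (what is proved, stated in full; the proofs are below) =====
def Claim_equal_majorClass : Prop := ∀ (labelArr : List Int), Dom_majorClass labelArr → Pre_majorClass labelArr → Spec_majorClass labelArr (majorClass labelArr)

-- ===== LEMMAS AND PROOFS =====

-- A's counting update and B's counting update are the same function (negated test, swapped branches).
theorem count_fn_eq :
    (fun (d : PySem.Dict Int Int) (j : Int) =>
        if !(d.contains j) then d.insert j 1 else d.insert j (d.getD j 0 + 1))
      = (fun (d : PySem.Dict Int Int) (j : Int) =>
        if d.contains j then d.insert j (d.getD j 0 + 1) else d.insert j 1) := by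
  funext d j
  by_cases h : d.contains j = true <;> simp [h]

-- one counting step keeps the item list nonempty
theorem count_step_ne_nil (d : PySem.Dict Int Int) (j : Int) (hd : d.items ≠ []) :
    ((if d.contains j then d.insert j (d.getD j 0 + 1) else d.insert j 1)).items ≠ [] := by
  by_cases h : d.contains j = true <;>
    simp [h, PySem.Dict.insert, PySem.Dict.items] <;>
    simp [PySem.Dict.items] at hd <;> simp [hd]

theorem count_fold_ne_nil (l : List Int) (d : PySem.Dict Int Int) (hd : d.items ≠ []) :
    (l.foldl (fun d j => if d.contains j then d.insert j (d.getD j 0 + 1) else d.insert j 1) d).items ≠ [] := by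
  induction l generalizing d with
  | nil => exact hd
  | cons x l ih => exact ih _ (count_step_ne_nil d x hd)

-- head of the left fold of insertBy (reverse-sort insertion) = linear strict-'>' selection scan
theorem head_foldl_insertBy (l : List (Int × Int)) :
    ∀ (h : Int × Int) (t : List (Int × Int)), ∃ t',
      l.foldl (fun acc x => PySem.List.insertBy (fun a b => decide (b.2 < a.2)) x acc) (h :: t)
        = (l.foldl (fun best item => if item.2 > best.2 then item else best) h) :: t' := by
  induction l with
  | nil => intro h t; exact ⟨t, rfl⟩
  | cons x l ih =>
      intro h t
      simp only [List.foldl_cons]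
      by_cases hc : h.2 < x.2
      · have : PySem.List.insertBy (fun a b => decide (b.2 < a.2)) x (h :: t) = x :: h :: t := by
          simp [PySem.List.insertBy, hc]
        rw [this]
        have hif : (if x.2 > h.2 then x else h) = x := by simp [hc]
        rw [hif]
        exact ih x (h :: t)
      · have : PySem.List.insertBy (fun a b => decide (b.2 < a.2)) x (h :: t)
            = h :: PySem.List.insertBy (fun a b => decide (b.2 < a.2)) x t := by
          simp [PySem.List.insertBy, hc]
        rw [this]
        have hif : (if x.2 > h.2 then x else h) = h := by simp [hc]
        rw [hif]
        exact ih h _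

-- ===== VERDICT (by name: the statement is the Claim_ definition above) =====
theorem majorClass_spec : Claim_equal_majorClass := by
  intro labelArr _ hpre
  unfold Spec_majorClass majorClass majorClass_alt
  simp only [count_fn_eq]
  set counts := labelArr.foldl (fun d j =>
    if d.contains j then d.insert j (d.getD j 0 + 1) else d.insert j 1)
    (PySem.Dict.empty : PySem.Dict Int Int) with hcounts
  have hne : counts.items ≠ [] := by
    cases labelArr with
    | nil => exact absurd rfl hpre
    | cons j rest =>
        rw [hcounts]
        simp only [List.foldl_cons]
        apply count_fold_ne_nil
        by_cases h : (PySem.Dict.empty : PySem.Dict Int Int).contains j = true <;>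
          simp [PySem.Dict.empty, PySem.Dict.contains, PySem.Dict.insert] at h ⊢
  rcases hh : counts.items with _ | ⟨h, t⟩
  · exact absurd hh hne
  · rw [PySem.List.sorted_rev_eq_foldl_insertBy]
    simp only [List.foldl_cons]
    have hins : PySem.List.insertBy (fun a b => decide (b.2 < a.2)) h ([] : List (Int × Int))
        = [h] := by simp [PySem.List.insertBy]
    rw [hins]
    obtain ⟨t', ht'⟩ := head_foldl_insertBy t h []
    rw [ht']
    simp [PySem.List.pyGet?, PySem.List.pyIdx?]
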